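-- pv_equiv track=rewrite | github.com/yan-grsr/CodeWars | Python/4 kyu/smallestPossibleSum.py | solution
-- ===== SOURCE A (Python) =====
-- def solution(X):
--     loop = 1
--     while loop:
--         if X.count(X[0]) == len(X):
--             break
--         for j in range(len(X)):
--             for i in range(len(X)):
--                 if X[i] > X[j]:
--                     X[i] = X[i] - X[j]
--     return sum(X)
-- ===== SOURCE B (Python) =====
-- def solution(X):
--     # Smallest possible sum = len(X) * gcd(X), by a Euclidean gcd fold.
--     # Note: unlike A, B does not mutate X in place (return value equivalence only).
--     g = 0
--     for x in X:
--         while x: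
--             g, x = x, g % x
--     return g * len(X)
-- ===== Notes on version B (the rewrite author's own statement) =====
-- stated objective: alternative
-- what changed: A's nested repeated-subtraction passes iterated to a fixed point are replaced by a single fold of the Euclidean gcd over the list, returning len(X) * gcd(X).
-- crash fix: On the empty list A raises IndexError (X[0]); B returns 0. — e.g. on solution([]): A raises IndexError, B returns 0
import Mathlib
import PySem

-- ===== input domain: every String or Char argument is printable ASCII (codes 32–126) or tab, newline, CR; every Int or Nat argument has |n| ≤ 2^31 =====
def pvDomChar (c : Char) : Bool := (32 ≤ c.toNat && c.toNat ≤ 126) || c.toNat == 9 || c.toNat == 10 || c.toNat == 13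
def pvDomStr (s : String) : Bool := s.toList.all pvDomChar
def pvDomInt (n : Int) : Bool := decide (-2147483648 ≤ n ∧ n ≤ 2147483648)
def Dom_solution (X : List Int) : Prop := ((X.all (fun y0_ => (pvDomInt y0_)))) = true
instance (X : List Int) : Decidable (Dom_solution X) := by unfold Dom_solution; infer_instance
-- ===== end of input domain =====

-- B replaces A's repeated-subtraction fixed point by a single Euclidean-gcd fold
-- (smallest sum = len(X) * gcd(X)); A mutates X in place, B does not — the equivalence proved
-- here is about the return value only.

-- ===== PORT A =====
-- One body step 'if X[i] > X[j]: X[i] = X[i] - X[j]'. The indices i, j come from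
-- 'range(len(X))' and the length is invariant, so they are always in range: Python's
-- X[i] / X[j] is exactly List.getD here (no IndexError possible), and the assignment is List.set.
def pyStep (j : Nat) (Z : List Int) (i : Nat) : List Int :=
  if Z.getD j 0 < Z.getD i 0 then Z.set i (Z.getD i 0 - Z.getD j 0) else Z

-- the 'for j in range(len(X)): for i in range(len(X)): …' double pass
def pyPass (X : List Int) : List Int :=
  (List.range X.length).foldl (fun Y j => (List.range Y.length).foldl (pyStep j) Y) X

-- 'X.count(X[0]) == len(X)'; under Pre_ X is nonempty, so X[0] = X.headD 0.
def pyAllEq (X : List Int) : Bool := X.count (X.headD 0) == X.length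

-- 'while loop: …' — fuel makes the loop a total function; under Pre_ the sum strictly
-- decreases each non-final iteration and stays ≥ 1, so sum(X)+1 rounds always suffice.
def pyLoop : Nat → List Int → List Int
  | 0, X => X
  | fuel + 1, X => if pyAllEq X then X else pyLoop fuel (pyPass X)

def solution (X : List Int) : Int :=
  (pyLoop ((X.foldl (· + ·) 0).toNat + 1) X).foldl (· + ·) 0

-- ===== PORT B =====
-- termination of the Euclid while-loop: the new second variable g % x shrinks in absolute value
theorem pymod_natAbs_lt (g x : Int) (_hx : ¬ x = 0) :
    (PySem.Int.mod g x).natAbs < x.natAbs := by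
  rcases lt_or_gt_of_ne _hx with h | h
  · have := PySem.Int.mod_neg_bounds (a := g) h; omega
  · have h1 := PySem.Int.mod_nonneg (a := g) h
    have h2 := PySem.Int.mod_lt (a := g) h; omega

-- 'while x: g, x = x, g % x' (Python % = PySem.Int.mod, floor convention)
def euclid (g x : Int) : Int :=
  if hx : x = 0 then g else euclid x (PySem.Int.mod g x)
termination_by x.natAbs
decreasing_by exact pymod_natAbs_lt g x hx

def solution_alt (X : List Int) : Int := (X.foldl euclid 0) * (X.length : Int)

-- ===== PRECONDITION & SPEC =====
-- Pre_ excludes exactly the inputs where A never returns: the empty list (X[0] raises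
-- IndexError) and lists containing a non-positive element without being constant, on which
-- A's subtraction loop runs forever.  On every input A returns on — nonempty all-positive
-- lists, and constant lists of any sign — Pre_ holds.
def Pre_solution (X : List Int) : Prop :=
  X ≠ [] ∧ ((∀ x ∈ X, 0 < x) ∨ (∀ x ∈ X, x = X.headD 0))
instance (X : List Int) : Decidable (Pre_solution X) := by unfold Pre_solution; infer_instance
def pvWitness_solution : List Int := [6, 4, 10]

-- On the empty list A raises IndexError (X[0]); B returns 0.
def Raises_solution (X : List Int) : Prop := X = []
instance (X : List Int) : Decidable (Raises_solution X) := by unfold Raises_solution; infer_instance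
def pvRaiseWitness_solution : List Int := []
def pvRaiseWitnessOut_solution : Int := 0

def Spec_solution (X : List Int) (out : Int) : Prop := out = solution_alt X
instance (X : List Int) (out : Int) : Decidable (Spec_solution X out) := by unfold Spec_solution; infer_instance

-- ===== CLAIM (what is proved, stated in full; the proofs are below) =====
def Claim_equal_solution : Prop :=
  ∀ (X : List Int), Dom_solution X → Pre_solution X → Spec_solution X (solution X)
def Claim_raises_solution : Prop :=
  (∀ (X : List Int), Dom_solution X → Raises_solution X → ¬ Pre_solution X) ∧
  (Dom_solution (pvRaiseWitness_solution) ∧ Raises_solution (pvRaiseWitness_solution) ∧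
   solution_alt (pvRaiseWitness_solution) = pvRaiseWitnessOut_solution)

-- ===== LEMMAS AND PROOFS =====

/-- gcd of all the elements of a list (0 for the empty list). -/
def Gd : List Int → Nat
  | [] => 0
  | a :: Z => Int.gcd a (Gd Z)

theorem Gd_dvd {Z : List Int} {x : Int} (h : x ∈ Z) : ((Gd Z : Int)) ∣ x := by
  induction Z with
  | nil => cases h
  | cons a Z ih =>
    rcases List.mem_cons.mp h with h | h
    · rw [h]; exact Int.gcd_dvd_left a (Gd Z)
    · exact dvd_trans (Int.gcd_dvd_right a (Gd Z)) (ih h)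

theorem dvd_Gd {Z : List Int} (k : Int) (h : ∀ x ∈ Z, k ∣ x) : k ∣ ((Gd Z : Int)) := by
  induction Z with
  | nil => simp [Gd]
  | cons a Z ih =>
    exact Int.dvd_coe_gcd (h a (List.mem_cons_self)) (ih (fun x hx => h x (List.mem_cons_of_mem a hx)))

theorem sum_set (l : List Int) (i : Nat) (v : Int) (h : i < l.length) :
    (l.set i v).sum = l.sum - l[i] + v := by
  induction l generalizing i with
  | nil => simp at h
  | cons a l ih =>
    cases i with
    | zero => simp; ring
    | succ i => simp at h ⊢; rw [ih i (by omega)]; ring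

theorem step_length (j : Nat) (Z : List Int) (i : Nat) : (pyStep j Z i).length = Z.length := by
  unfold pyStep; split <;> simp

theorem step_pos {Z : List Int} (j i : Nat) (hpos : ∀ x ∈ Z, 0 < x) :
    ∀ x ∈ pyStep j Z i, 0 < x := by
  unfold pyStep; split
  · intro x hx
    rcases List.mem_or_eq_of_mem_set hx with h | rfl
    · exact hpos x h
    · omega
  · exact hpos

theorem step_gcd {Z : List Int} {j i : Nat} (hj : j < Z.length) (hi : i < Z.length) :
    Gd (pyStep j Z i) = Gd Z := by
  unfold pyStep; split
  · rename_i hlt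
    rw [List.getD_eq_getElem _ _ hi, List.getD_eq_getElem _ _ hj] at hlt ⊢
    have hij : i ≠ j := by intro h; subst h; omega
    set v := Z[i] - Z[j] with hv
    have hiv : i < (Z.set i v).length := by simpa using hi
    have hv_mem : v ∈ Z.set i v :=
      List.mem_iff_getElem.mpr ⟨i, hiv, List.getElem_set_self (h := hiv)⟩
    have hj_mem : Z[j] ∈ Z.set i v :=
      List.mem_iff_getElem.mpr ⟨j, by simpa using hj, by rw [List.getElem_set_ne (by omega)]⟩
    apply Nat.dvd_antisymm
    · -- Gd (set) ∣ Gd Z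
      rw [← Int.natCast_dvd_natCast]
      apply dvd_Gd
      intro x hx
      have hx' : x ∈ (Z.set i v).set i Z[i] := by
        rw [List.set_set, List.set_getElem_self]; exact hx
      rcases List.mem_or_eq_of_mem_set hx' with h | rfl
      · exact Gd_dvd h
      · have : Z[i] = v + Z[j] := by omega
        rw [this]; exact dvd_add (Gd_dvd hv_mem) (Gd_dvd hj_mem)
    · -- Gd Z ∣ Gd (set)
      rw [← Int.natCast_dvd_natCast]
      apply dvd_Gd
      intro x hx
      rcases List.mem_or_eq_of_mem_set hx with h | rfl
      · exact Gd_dvd h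
      · exact dvd_sub (Gd_dvd (List.getElem_mem hi)) (Gd_dvd (List.getElem_mem hj))
  · rfl

theorem step_sum {Z : List Int} {j i : Nat} (hj : j < Z.length) (hi : i < Z.length)
    (hpos : ∀ x ∈ Z, 0 < x) :
    (pyStep j Z i).sum ≤ Z.sum ∧
      (Z.sum ≤ (pyStep j Z i).sum → pyStep j Z i = Z ∧ Z.getD i 0 ≤ Z.getD j 0) := by
  unfold pyStep; split
  · rename_i hlt
    have hjpos : 0 < Z[j] := hpos _ (List.getElem_mem hj)
    rw [List.getD_eq_getElem _ _ hi, List.getD_eq_getElem _ _ hj] at hlt ⊢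
    rw [sum_set Z i _ hi]
    constructor
    · omega
    · intro h; omega
  · exact ⟨le_refl _, fun _ => ⟨rfl, by rename_i h; omega⟩⟩

theorem inner_fold (j : Nat) (l : List Nat) :
    ∀ (Z : List Int), (∀ i ∈ l, i < Z.length) → j < Z.length → (∀ x ∈ Z, 0 < x) →
      (l.foldl (pyStep j) Z).length = Z.length ∧
      (∀ x ∈ l.foldl (pyStep j) Z, 0 < x) ∧
      Gd (l.foldl (pyStep j) Z) = Gd Z ∧
      (l.foldl (pyStep j) Z).sum ≤ Z.sum ∧
      (Z.sum ≤ (l.foldl (pyStep j) Z).sum →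
        l.foldl (pyStep j) Z = Z ∧ ∀ i ∈ l, Z.getD i 0 ≤ Z.getD j 0) := by
  induction l with
  | nil => intro Z _ _ hpos; exact ⟨rfl, hpos, rfl, le_refl _, fun _ => ⟨rfl, by simp⟩⟩
  | cons i l ih =>
    intro Z hl hj hpos
    have hi : i < Z.length := hl i List.mem_cons_self
    have hlen1 := step_length j Z i
    have hpos1 := step_pos j i hpos
    have hsum1 := step_sum hj hi hpos
    obtain ⟨ihlen, ihpos, ihgcd, ihsum, iheq⟩ :=
      ih (pyStep j Z i) (fun i' hi' => by rw [hlen1]; exact hl i' (List.mem_cons_of_mem i hi'))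
        (by rw [hlen1]; exact hj) hpos1
    simp only [List.foldl_cons]
    refine ⟨by rw [ihlen, hlen1], ihpos, by rw [ihgcd, step_gcd hj hi], le_trans ihsum hsum1.1, ?_⟩
    intro hle
    have hstepeq : pyStep j Z i = Z ∧ Z.getD i 0 ≤ Z.getD j 0 :=
      hsum1.2 (le_trans hle ihsum)
    rw [hstepeq.1] at iheq hle ⊢
    obtain ⟨hR, hbounds⟩ := iheq hle
    exact ⟨hR, fun i' hi' => by
      rcases List.mem_cons.mp hi' with rfl | h
      · exact hstepeq.2
      · exact hbounds i' h⟩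

theorem outer_fold (l : List Nat) :
    ∀ (Z : List Int), (∀ j ∈ l, j < Z.length) → (∀ x ∈ Z, 0 < x) →
      (l.foldl (fun Y j => (List.range Y.length).foldl (pyStep j) Y) Z).length = Z.length ∧
      (∀ x ∈ l.foldl (fun Y j => (List.range Y.length).foldl (pyStep j) Y) Z, 0 < x) ∧
      Gd (l.foldl (fun Y j => (List.range Y.length).foldl (pyStep j) Y) Z) = Gd Z ∧
      (l.foldl (fun Y j => (List.range Y.length).foldl (pyStep j) Y) Z).sum ≤ Z.sum ∧
      (Z.sum ≤ (l.foldl (fun Y j => (List.range Y.length).foldl (pyStep j) Y) Z).sum →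
        ∀ j ∈ l, ∀ i, i < Z.length → Z.getD i 0 ≤ Z.getD j 0) := by
  induction l with
  | nil => intro Z _ hpos; exact ⟨rfl, hpos, rfl, le_refl _, fun _ => by simp⟩
  | cons j l ih =>
    intro Z hl hpos
    have hj : j < Z.length := hl j List.mem_cons_self
    obtain ⟨ilen, ipos, igcd, isum, ieq⟩ :=
      inner_fold j (List.range Z.length) Z (fun i hi => List.mem_range.mp hi) hj hpos
    set Z1 := (List.range Z.length).foldl (pyStep j) Z with hZ1
    obtain ⟨olen, opos, ogcd, osum, oeq⟩ :=
      ih Z1 (fun j' hj' => by rw [ilen]; exact hl j' (List.mem_cons_of_mem j hj')) ipos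
    simp only [List.foldl_cons]
    refine ⟨by rw [olen, ilen], opos, by rw [ogcd, igcd], le_trans osum isum, ?_⟩
    intro hle
    obtain ⟨hZeq, hbounds⟩ := ieq (le_trans hle osum)
    rw [← hZ1] at hle
    rw [hZeq] at oeq hle
    have hrest := oeq hle
    intro j' hj' i hi
    rcases List.mem_cons.mp hj' with rfl | h
    · exact hbounds i (List.mem_range.mpr hi)
    · exact hrest j' h i hi

theorem allEq_of_count {X : List Int} (h : pyAllEq X = true) : ∀ b ∈ X, b = X.headD 0 := by
  unfold pyAllEq at h
  simp only [beq_iff_eq] at h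
  exact fun b hb => (List.count_eq_length.mp h b hb).symm

theorem count_of_allEq {X : List Int} (h : ∀ b ∈ X, b = X.headD 0) : pyAllEq X = true := by
  unfold pyAllEq
  simp only [beq_iff_eq]
  exact List.count_eq_length.mpr (fun b hb => (h b hb).symm)

theorem pass_props {X : List Int} (hne : X ≠ []) (hpos : ∀ x ∈ X, 0 < x) :
    (pyPass X).length = X.length ∧ (∀ x ∈ pyPass X, 0 < x) ∧ Gd (pyPass X) = Gd X ∧
      (pyAllEq X = false → (pyPass X).sum < X.sum) := by
  obtain ⟨plen, ppos, pgcd, psum, peq⟩ :=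
    outer_fold (List.range X.length) X (fun j hj => List.mem_range.mp hj) hpos
  refine ⟨plen, ppos, pgcd, ?_⟩
  intro hfalse
  by_contra hnlt
  rw [not_lt] at hnlt
  have hbounds := peq hnlt
  have hall : ∀ b ∈ X, b = X.headD 0 := by
    intro b hb
    obtain ⟨k, hk, rfl⟩ := List.mem_iff_getElem.mp hb
    have h0 : 0 < X.length := by cases X with | nil => exact absurd rfl hne | cons a X => simp
    have h1 : X.getD k 0 ≤ X.getD 0 0 :=
      hbounds 0 (List.mem_range.mpr h0) k hk
    have h2 : X.getD 0 0 ≤ X.getD k 0 :=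
      hbounds k (List.mem_range.mpr hk) 0 h0
    rw [List.getD_eq_getElem _ _ hk, List.getD_eq_getElem _ _ h0] at h1 h2
    have : X.headD 0 = X[0] := by cases X with | nil => simp at h0 | cons a X => rfl
    omega
  rw [count_of_allEq hall] at hfalse
  cases hfalse

theorem loop_post : ∀ (fuel : Nat) (X : List Int), X ≠ [] → (∀ x ∈ X, 0 < x) →
    X.sum.toNat < fuel →
    (pyLoop fuel X).length = X.length ∧ (∀ x ∈ pyLoop fuel X, 0 < x) ∧
      Gd (pyLoop fuel X) = Gd X ∧ pyAllEq (pyLoop fuel X) = true := by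
  intro fuel
  induction fuel with
  | zero => intro X hne hpos h; omega
  | succ fuel ih =>
    intro X hne hpos hfuel
    unfold pyLoop
    by_cases hEq : pyAllEq X = true
    · rw [if_pos hEq]; exact ⟨rfl, hpos, rfl, hEq⟩
    · have hEq' : pyAllEq X = false := by simpa using hEq
      rw [if_neg (by simp [hEq'])]
      obtain ⟨plen, ppos, pgcd, psum⟩ := pass_props hne hpos
      have hlt := psum hEq'
      have hXpos : 0 < X.sum := List.sum_pos X hpos hne
      have hPpos : 0 < (pyPass X).sum :=
        List.sum_pos _ ppos (by intro h; rw [h] at plen; cases X with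
          | nil => exact hne rfl | cons a X => simp at plen)
      obtain ⟨llen, lpos, lgcd, lall⟩ :=
        ih (pyPass X) (by intro h; rw [h] at plen; cases X with
          | nil => exact hne rfl | cons a X => simp at plen) ppos (by omega)
      exact ⟨by rw [llen, plen], lpos, by rw [lgcd, pgcd], lall⟩

theorem sum_const {X : List Int} {c : Int} (h : ∀ b ∈ X, b = c) :
    X.sum = (X.length : Int) * c := by
  induction X with
  | nil => simp
  | cons a X ih =>
    have ha : a = c := h a List.mem_cons_self
    rw [List.sum_cons, ih (fun b hb => h b (List.mem_cons_of_mem a hb)), ha]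
    simp only [List.length_cons]; push_cast; ring

theorem Gd_const {X : List Int} {c : Int} (hne : X ≠ []) (hc : 0 < c)
    (h : ∀ b ∈ X, b = c) : (Gd X : Int) = c := by
  have hmem : c ∈ X := by
    cases X with
    | nil => exact absurd rfl hne
    | cons a X => rw [← h a List.mem_cons_self]; exact List.mem_cons_self
  exact Int.dvd_antisymm (Int.natCast_nonneg _) (le_of_lt hc)
    (Gd_dvd hmem) (dvd_Gd c (fun x hx => (h x hx) ▸ dvd_refl c))

-- the A side, positive branch: solution X = len(X) * gcd(X)
theorem solution_eq_gcd {X : List Int} (hne : X ≠ []) (hpos : ∀ x ∈ X, 0 < x) :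
    solution X = (X.length : Int) * (Gd X : Int) := by
  unfold solution
  rw [← List.sum_eq_foldl, ← List.sum_eq_foldl]
  obtain ⟨llen, lpos, lgcd, lall⟩ :=
    loop_post (X.sum.toNat + 1) X hne hpos (by omega)
  set R := pyLoop (X.sum.toNat + 1) X with hR
  have hRne : R ≠ [] := by
    intro h; rw [h] at llen; cases X with
    | nil => exact hne rfl | cons a X => simp at llen
  have hall := allEq_of_count lall
  set c := R.headD 0 with hc
  have hcmem : c ∈ R := by
    cases hR' : R with
    | nil => exact absurd hR' hRne
    | cons a R' => rw [hc, hR']; simp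
  have hcpos : 0 < c := lpos c hcmem
  rw [sum_const hall, llen, ← Gd_const hRne hcpos hall, lgcd]

theorem euclid_zero (g : Int) : euclid g 0 = g := by rw [euclid]; simp

theorem euclid_gcd : ∀ (n : Nat) (x g : Int), x.natAbs ≤ n → 0 < x →
    euclid g x = (Int.gcd g x : Int) := by
  intro n
  induction n with
  | zero => intro x g h hx; omega
  | succ n ih =>
    intro x g h hx
    have hx0 : x ≠ 0 := by omega
    rw [euclid]; simp only [hx0, dite_false]
    set r := PySem.Int.mod g x with hr
    by_cases hr0 : r = 0
    · rw [hr0, euclid_zero]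
      have hdvd : x ∣ g := (PySem.Int.mod_eq_zero_iff_dvd g x).mp hr0
      rw [Int.gcd_eq_natAbs_right_iff_dvd.mpr hdvd]
      omega
    · have hrpos : 0 < r := by
        have := PySem.Int.mod_nonneg (a := g) hx; omega
      have hrlt : r < x := PySem.Int.mod_lt (a := g) hx
      rw [ih r x (by omega) hrpos]
      have hg : r = g - x * PySem.Int.floordiv g x := by
        have h' := PySem.Int.floordiv_mul_add_mod g x
        rw [hr]; linarith [mul_comm x (PySem.Int.floordiv g x)]
      rw [hg, Int.gcd_sub_mul_left_right x g (PySem.Int.floordiv g x), Int.gcd_comm]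

theorem fold_euclid {X : List Int} (hpos : ∀ x ∈ X, 0 < x) :
    ∀ g : Nat, X.foldl euclid (g : Int) = (Nat.gcd g (Gd X) : Int) := by
  induction X with
  | nil => intro g; simp [Gd]
  | cons a X ih =>
    intro g
    have ha : 0 < a := hpos a List.mem_cons_self
    rw [List.foldl_cons, euclid_gcd a.natAbs a (g : Int) (le_refl _) ha,
      ih (fun x hx => hpos x (List.mem_cons_of_mem a hx)) (Int.gcd (g : Int) a)]
    have h1 : Int.gcd (g : Int) a = Nat.gcd g a.natAbs := by simp [Int.gcd]
    have h2 : Gd (a :: X) = Nat.gcd a.natAbs (Gd X) := by simp [Gd, Int.gcd]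
    rw [h1, h2, Nat.gcd_assoc]

-- the B side, positive branch: solution_alt X = gcd(X) * len(X)
theorem solution_alt_eq_gcd {X : List Int} (hpos : ∀ x ∈ X, 0 < x) :
    solution_alt X = (Gd X : Int) * (X.length : Int) := by
  unfold solution_alt
  have h := fold_euclid hpos 0
  simp only [Nat.cast_zero] at h
  rw [h, Nat.gcd_zero_left]

-- constant branch: euclid fixes c from accumulator 0 or c
theorem euclid_const (c : Int) : euclid 0 c = c ∧ euclid c c = c := by
  by_cases hc : c = 0
  · subst hc; exact ⟨euclid_zero 0, euclid_zero 0⟩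
  · constructor
    · rw [euclid]; simp only [hc, dite_false]
      have : PySem.Int.mod 0 c = 0 := (PySem.Int.mod_eq_zero_iff_dvd 0 c).mpr (dvd_zero c)
      rw [this, euclid_zero]
    · rw [euclid]; simp only [hc, dite_false]
      have : PySem.Int.mod c c = 0 := (PySem.Int.mod_eq_zero_iff_dvd c c).mpr (dvd_refl c)
      rw [this, euclid_zero]

theorem fold_euclid_const {X : List Int} {c : Int} (h : ∀ b ∈ X, b = c) :
    X.foldl euclid c = c := by
  induction X with
  | nil => rfl
  | cons a X ih =>
    rw [List.foldl_cons, h a List.mem_cons_self, (euclid_const c).2]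
    exact ih (fun b hb => h b (List.mem_cons_of_mem a hb))

theorem const_branch {X : List Int} (hne : X ≠ []) (h : ∀ b ∈ X, b = X.headD 0) :
    solution X = solution_alt X := by
  set c := X.headD 0 with hc
  -- A: the all-equal test succeeds immediately, the loop returns X unchanged
  have hA : solution X = X.sum := by
    unfold solution pyLoop
    rw [count_of_allEq h]
    simp [← List.sum_eq_foldl]
  -- B: the gcd fold over a constant list returns c
  have hB : solution_alt X = c * (X.length : Int) := by
    unfold solution_alt
    cases X with
    | nil => exact absurd rfl hne
    | cons a X' =>
      have ha : a = c := h a List.mem_cons_self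
      rw [List.foldl_cons, ha, (euclid_const c).1,
        fold_euclid_const (fun b hb => h b (List.mem_cons_of_mem a hb))]
  rw [hA, hB, sum_const h]; ring

-- ===== VERDICT (by name: the statement is the Claim_ definition above) =====
theorem solution_spec : Claim_equal_solution := by
  intro X _ hPre
  unfold Spec_solution
  obtain ⟨hne, hcase⟩ := hPre
  rcases hcase with hpos | hconst
  · rw [solution_eq_gcd hne hpos, solution_alt_eq_gcd hpos]; ring
  · exact const_branch hne hconst

def solution_raises : Claim_raises_solution := by
  unfold Claim_raises_solution
  exact ⟨fun X _ hR hP => hP.1 hR, by decide⟩
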